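-- pv_equiv track=rewrite | github.com/arccos534/comment-analytics-mvp | backend/app/analytics/prompt_intent.py | determine_secondary_modes
-- ===== SOURCE A (Python) =====
-- def determine_secondary_modes(raw_modes: list[str], primary_mode: str, has_explicit_scope: bool) -> list[str]:
--     raw_set = set(raw_modes)
--     secondary: list[str] = []
--     single_post_reaction_request = bool("reaction_analysis" in raw_set and ("specific_news_answer" in raw_set or has_explicit_scope))
--
--     if primary_mode != "source_comparison" and ("source_comparison" in raw_set or "low_subscribers_high_engagement_request" in raw_set):
--         secondary.append("source_comparison")
--     if primary_mode != "post_popularity" and {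
--         "most_discussed_news",
--         "most_reacted_post",
--         "most_viewed_post",
--         "successful_posts_bucket",
--         "successful_post_request",
--         "successful_posts_request",
--         "specific_news_answer",
--     } & raw_set:
--         secondary.append("post_popularity")
--     if primary_mode != "post_underperformance" and {
--         "least_reacted_post",
--         "least_viewed_post",
--         "underperforming_posts_bucket",
--     } & raw_set:
--         secondary.append("post_underperformance")
--     if primary_mode != "post_sentiment" and ({"most_negative_post", "most_positive_post"} & raw_set or single_post_reaction_request):
--         secondary.append("post_sentiment")
--     if primary_mode != "theme_popularity" and "theme_popularity_ranked" in raw_set: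
--         secondary.append("theme_popularity")
--     if primary_mode != "theme_underperformance" and ({"theme_underperformance_ranked", "theme_low_interest_request"} & raw_set):
--         secondary.append("theme_underperformance")
--     if primary_mode != "theme_sentiment" and {
--         "negative_analysis",
--         "positive_analysis",
--         "reaction_analysis",
--         "support_analysis",
--         "complaints_analysis",
--         "concerns_analysis",
--         "polarization_analysis",
--     } & raw_set and not single_post_reaction_request:
--         secondary.append("theme_sentiment")
--     if primary_mode != "theme_interest" and "interest_analysis" in raw_set:
--         secondary.append("theme_interest")
--     if primary_mode != "topic_report" and ("theme_analysis" in raw_set or has_explicit_scope):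
--         secondary.append("topic_report")
--     if "causal_explanation" in raw_set:
--         secondary.append("causal_explanation")
--     if "comparison" in raw_set:
--         secondary.append("comparison")
--     if "periodic_report" in raw_set:
--         secondary.append("periodic_report")
--     if "takeaways_analysis" in raw_set:
--         secondary.append("takeaways_analysis")
--
--     deduped: list[str] = []
--     for mode in secondary:
--         if mode not in deduped:
--             deduped.append(mode)
--     return deduped
-- ===== SOURCE B (Python) =====
-- # Inverted index: map each raw tag to the secondary mode it triggers, scan the
-- # input once collecting triggered modes, then emit in canonical order.
--
-- _TAG_TO_SECONDARY = {
--     "source_comparison": "source_comparison",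
--     "low_subscribers_high_engagement_request": "source_comparison",
--     "most_discussed_news": "post_popularity",
--     "most_reacted_post": "post_popularity",
--     "most_viewed_post": "post_popularity",
--     "successful_posts_bucket": "post_popularity",
--     "successful_post_request": "post_popularity",
--     "successful_posts_request": "post_popularity",
--     "specific_news_answer": "post_popularity",
--     "least_reacted_post": "post_underperformance",
--     "least_viewed_post": "post_underperformance",
--     "underperforming_posts_bucket": "post_underperformance",
--     "most_negative_post": "post_sentiment",
--     "most_positive_post": "post_sentiment",
--     "theme_popularity_ranked": "theme_popularity",
--     "theme_underperformance_ranked": "theme_underperformance",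
--     "theme_low_interest_request": "theme_underperformance",
--     "negative_analysis": "theme_sentiment",
--     "positive_analysis": "theme_sentiment",
--     "reaction_analysis": "theme_sentiment",
--     "support_analysis": "theme_sentiment",
--     "complaints_analysis": "theme_sentiment",
--     "concerns_analysis": "theme_sentiment",
--     "polarization_analysis": "theme_sentiment",
--     "interest_analysis": "theme_interest",
--     "theme_analysis": "topic_report",
--     "causal_explanation": "causal_explanation",
--     "comparison": "comparison",
--     "periodic_report": "periodic_report",
--     "takeaways_analysis": "takeaways_analysis",
-- }
--
-- _ORDER = [
--     "source_comparison", "post_popularity", "post_underperformance",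
--     "post_sentiment", "theme_popularity", "theme_underperformance",
--     "theme_sentiment", "theme_interest", "topic_report",
--     "causal_explanation", "comparison", "periodic_report", "takeaways_analysis",
-- ]
--
-- # the four pass-through modes are never suppressed by primary_mode
-- _UNSUPPRESSED = {"causal_explanation", "comparison", "periodic_report", "takeaways_analysis"}
--
--
-- def determine_secondary_modes(raw_modes: list[str], primary_mode: str, has_explicit_scope: bool) -> list[str]:
--     triggered: set[str] = set()
--     for tag in raw_modes:
--         sec = _TAG_TO_SECONDARY.get(tag)
--         if sec is not None:
--             triggered.add(sec)
--
--     single_post_reaction = "reaction_analysis" in raw_modes and (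
--         "specific_news_answer" in raw_modes or has_explicit_scope
--     )
--     if single_post_reaction:
--         triggered.add("post_sentiment")
--         triggered.discard("theme_sentiment")
--     if has_explicit_scope:
--         triggered.add("topic_report")
--
--     return [
--         mode for mode in _ORDER
--         if mode in triggered and (mode in _UNSUPPRESSED or mode != primary_mode)
--     ]
-- ===== Notes on version B (the rewrite author's own statement) =====
-- stated objective: alternative
-- what changed: Replaces A's fixed chain of rule-by-rule membership tests against the tag set (plus a trailing dedup pass) by an inverted tag-to-secondary index: one pass over raw_modes collects the set of triggered secondaries via dict lookup, two special-case adjustments handle the single-post-reaction and explicit-scope rules, and the result is emitted by filtering a canonical order list.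
import Mathlib
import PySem

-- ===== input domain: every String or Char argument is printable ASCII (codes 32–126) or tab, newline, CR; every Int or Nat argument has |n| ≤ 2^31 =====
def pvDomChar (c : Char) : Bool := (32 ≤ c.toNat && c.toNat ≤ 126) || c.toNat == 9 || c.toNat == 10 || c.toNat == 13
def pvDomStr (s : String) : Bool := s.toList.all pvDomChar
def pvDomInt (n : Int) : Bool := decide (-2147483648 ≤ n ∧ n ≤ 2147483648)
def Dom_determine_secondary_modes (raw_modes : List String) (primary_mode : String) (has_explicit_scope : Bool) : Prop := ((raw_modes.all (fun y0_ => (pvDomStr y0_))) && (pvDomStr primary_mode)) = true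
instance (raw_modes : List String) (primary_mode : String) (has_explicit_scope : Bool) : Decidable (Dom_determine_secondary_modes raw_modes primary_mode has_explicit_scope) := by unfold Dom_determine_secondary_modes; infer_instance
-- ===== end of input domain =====

-- B inverts A's traversal: instead of testing each rule against the tag set, it maps each
-- input tag through an inverted tag→secondary index in one pass over raw_modes, then emits
-- the triggered modes in canonical order (objective: alternative).

-- ===== PORT A =====
-- literal transliteration of A: set build, sequential if/append chain, then a dedup pass
def determine_secondary_modes (raw_modes : List String) (primary_mode : String) (has_explicit_scope : Bool) : List String :=
  let raw_set : PySem.Set String := PySem.Set.ofList raw_modes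
  let secondary : List String := []
  let single_post_reaction_request : Bool :=
    PySem.Set.contains raw_set "reaction_analysis" &&
      (PySem.Set.contains raw_set "specific_news_answer" || has_explicit_scope)
  let secondary := if !(primary_mode == "source_comparison") &&
      (PySem.Set.contains raw_set "source_comparison" ||
        PySem.Set.contains raw_set "low_subscribers_high_engagement_request") then
    secondary ++ ["source_comparison"] else secondary
  let secondary := if !(primary_mode == "post_popularity") &&
      !(PySem.Set.inter (PySem.Set.ofList ["most_discussed_news", "most_reacted_post", "most_viewed_post", "successful_posts_bucket", "successful_post_request", "successful_posts_request", "specific_news_answer"]) raw_set).isEmpty then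
    secondary ++ ["post_popularity"] else secondary
  let secondary := if !(primary_mode == "post_underperformance") &&
      !(PySem.Set.inter (PySem.Set.ofList ["least_reacted_post", "least_viewed_post", "underperforming_posts_bucket"]) raw_set).isEmpty then
    secondary ++ ["post_underperformance"] else secondary
  let secondary := if !(primary_mode == "post_sentiment") &&
      (!(PySem.Set.inter (PySem.Set.ofList ["most_negative_post", "most_positive_post"]) raw_set).isEmpty || single_post_reaction_request) then
    secondary ++ ["post_sentiment"] else secondary
  let secondary := if !(primary_mode == "theme_popularity") &&
      PySem.Set.contains raw_set "theme_popularity_ranked" then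
    secondary ++ ["theme_popularity"] else secondary
  let secondary := if !(primary_mode == "theme_underperformance") &&
      !(PySem.Set.inter (PySem.Set.ofList ["theme_underperformance_ranked", "theme_low_interest_request"]) raw_set).isEmpty then
    secondary ++ ["theme_underperformance"] else secondary
  let secondary := if !(primary_mode == "theme_sentiment") &&
      !(PySem.Set.inter (PySem.Set.ofList ["negative_analysis", "positive_analysis", "reaction_analysis", "support_analysis", "complaints_analysis", "concerns_analysis", "polarization_analysis"]) raw_set).isEmpty && !single_post_reaction_request then
    secondary ++ ["theme_sentiment"] else secondary
  let secondary := if !(primary_mode == "theme_interest") &&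
      PySem.Set.contains raw_set "interest_analysis" then
    secondary ++ ["theme_interest"] else secondary
  let secondary := if !(primary_mode == "topic_report") &&
      (PySem.Set.contains raw_set "theme_analysis" || has_explicit_scope) then
    secondary ++ ["topic_report"] else secondary
  let secondary := if PySem.Set.contains raw_set "causal_explanation" then
    secondary ++ ["causal_explanation"] else secondary
  let secondary := if PySem.Set.contains raw_set "comparison" then
    secondary ++ ["comparison"] else secondary
  let secondary := if PySem.Set.contains raw_set "periodic_report" then
    secondary ++ ["periodic_report"] else secondary
  let secondary := if PySem.Set.contains raw_set "takeaways_analysis" then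
    secondary ++ ["takeaways_analysis"] else secondary
  secondary.foldl (fun deduped mode => if deduped.contains mode then deduped else deduped ++ [mode]) []

-- ===== PORT B =====
-- B-side constants: the module-level inverted index _TAG_TO_SECONDARY (a dict literal with
-- distinct keys, insertion order), the canonical order _ORDER and the _UNSUPPRESSED set
def pvTag2Sec : PySem.Dict String String := ⟨[
  ("source_comparison", "source_comparison"),
  ("low_subscribers_high_engagement_request", "source_comparison"),
  ("most_discussed_news", "post_popularity"),
  ("most_reacted_post", "post_popularity"),
  ("most_viewed_post", "post_popularity"),
  ("successful_posts_bucket", "post_popularity"),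
  ("successful_post_request", "post_popularity"),
  ("successful_posts_request", "post_popularity"),
  ("specific_news_answer", "post_popularity"),
  ("least_reacted_post", "post_underperformance"),
  ("least_viewed_post", "post_underperformance"),
  ("underperforming_posts_bucket", "post_underperformance"),
  ("most_negative_post", "post_sentiment"),
  ("most_positive_post", "post_sentiment"),
  ("theme_popularity_ranked", "theme_popularity"),
  ("theme_underperformance_ranked", "theme_underperformance"),
  ("theme_low_interest_request", "theme_underperformance"),
  ("negative_analysis", "theme_sentiment"),
  ("positive_analysis", "theme_sentiment"),
  ("reaction_analysis", "theme_sentiment"),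
  ("support_analysis", "theme_sentiment"),
  ("complaints_analysis", "theme_sentiment"),
  ("concerns_analysis", "theme_sentiment"),
  ("polarization_analysis", "theme_sentiment"),
  ("interest_analysis", "theme_interest"),
  ("theme_analysis", "topic_report"),
  ("causal_explanation", "causal_explanation"),
  ("comparison", "comparison"),
  ("periodic_report", "periodic_report"),
  ("takeaways_analysis", "takeaways_analysis")]⟩

def pvOrder : List String := [
  "source_comparison", "post_popularity", "post_underperformance",
  "post_sentiment", "theme_popularity", "theme_underperformance",
  "theme_sentiment", "theme_interest", "topic_report",
  "causal_explanation", "comparison", "periodic_report", "takeaways_analysis"]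

def pvAlways : PySem.Set String :=
  PySem.Set.ofList ["causal_explanation", "comparison", "periodic_report", "takeaways_analysis"]

-- port of B: one pass over raw_modes through the inverted index collecting the triggered
-- set, the two special-case adjustments, then emission in canonical order
def determine_secondary_modes_alt (raw_modes : List String) (primary_mode : String) (has_explicit_scope : Bool) : List String :=
  let triggered : PySem.Set String := raw_modes.foldl (fun acc tag =>
      match PySem.Dict.get? pvTag2Sec tag with
      | some sec => PySem.Set.add acc sec
      | none => acc) PySem.Set.empty
  let single_post_reaction : Bool :=
    raw_modes.contains "reaction_analysis" &&
      (raw_modes.contains "specific_news_answer" || has_explicit_scope)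
  let triggered := if single_post_reaction then
      PySem.Set.discard (PySem.Set.add triggered "post_sentiment") "theme_sentiment"
    else triggered
  let triggered := if has_explicit_scope then PySem.Set.add triggered "topic_report" else triggered
  pvOrder.filter (fun mode =>
    PySem.Set.contains triggered mode &&
      (PySem.Set.contains pvAlways mode || !(mode == primary_mode)))

-- ===== PRECONDITION & SPEC =====
def Spec_determine_secondary_modes (raw_modes : List String) (primary_mode : String) (has_explicit_scope : Bool) (out : List String) : Prop := out = determine_secondary_modes_alt raw_modes primary_mode has_explicit_scope
instance (raw_modes : List String) (primary_mode : String) (has_explicit_scope : Bool) (out : List String) : Decidable (Spec_determine_secondary_modes raw_modes primary_mode has_explicit_scope out) := by unfold Spec_determine_secondary_modes; infer_instance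

-- ===== CLAIM (what is proved, stated in full; the proofs are below) =====
def Claim_equal_determine_secondary_modes : Prop := ∀ (raw_modes : List String) (primary_mode : String) (has_explicit_scope : Bool), Dom_determine_secondary_modes raw_modes primary_mode has_explicit_scope → Spec_determine_secondary_modes raw_modes primary_mode has_explicit_scope (determine_secondary_modes raw_modes primary_mode has_explicit_scope)

-- ===== LEMMAS AND PROOFS =====
-- A's condition table, one entry per rule, in A's order (proof-only helper)
def pvCondA (raw_modes : List String) (primary_mode : String) (has_explicit_scope : Bool) (s : String) : Bool :=
  let raw_set : PySem.Set String := PySem.Set.ofList raw_modes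
  let spr : Bool := PySem.Set.contains raw_set "reaction_analysis" &&
      (PySem.Set.contains raw_set "specific_news_answer" || has_explicit_scope)
  if s == "source_comparison" then !(primary_mode == "source_comparison") && (PySem.Set.contains raw_set "source_comparison" || PySem.Set.contains raw_set "low_subscribers_high_engagement_request")
  else if s == "post_popularity" then !(primary_mode == "post_popularity") && !(PySem.Set.inter (PySem.Set.ofList ["most_discussed_news", "most_reacted_post", "most_viewed_post", "successful_posts_bucket", "successful_post_request", "successful_posts_request", "specific_news_answer"]) raw_set).isEmpty
  else if s == "post_underperformance" then !(primary_mode == "post_underperformance") && !(PySem.Set.inter (PySem.Set.ofList ["least_reacted_post", "least_viewed_post", "underperforming_posts_bucket"]) raw_set).isEmpty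
  else if s == "post_sentiment" then !(primary_mode == "post_sentiment") && (!(PySem.Set.inter (PySem.Set.ofList ["most_negative_post", "most_positive_post"]) raw_set).isEmpty || spr)
  else if s == "theme_popularity" then !(primary_mode == "theme_popularity") && PySem.Set.contains raw_set "theme_popularity_ranked"
  else if s == "theme_underperformance" then !(primary_mode == "theme_underperformance") && !(PySem.Set.inter (PySem.Set.ofList ["theme_underperformance_ranked", "theme_low_interest_request"]) raw_set).isEmpty
  else if s == "theme_sentiment" then !(primary_mode == "theme_sentiment") && !(PySem.Set.inter (PySem.Set.ofList ["negative_analysis", "positive_analysis", "reaction_analysis", "support_analysis", "complaints_analysis", "concerns_analysis", "polarization_analysis"]) raw_set).isEmpty && !spr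
  else if s == "theme_interest" then !(primary_mode == "theme_interest") && PySem.Set.contains raw_set "interest_analysis"
  else if s == "topic_report" then !(primary_mode == "topic_report") && (PySem.Set.contains raw_set "theme_analysis" || has_explicit_scope)
  else if s == "causal_explanation" then PySem.Set.contains raw_set "causal_explanation"
  else if s == "comparison" then PySem.Set.contains raw_set "comparison"
  else if s == "periodic_report" then PySem.Set.contains raw_set "periodic_report"
  else PySem.Set.contains raw_set "takeaways_analysis"

-- B's emission predicate (proof-only helper; B's body is literally pvOrder.filter of this)
def pvPredB (raw_modes : List String) (primary_mode : String) (has_explicit_scope : Bool) (mode : String) : Bool :=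
  let triggered : PySem.Set String := raw_modes.foldl (fun acc tag =>
      match PySem.Dict.get? pvTag2Sec tag with
      | some sec => PySem.Set.add acc sec
      | none => acc) PySem.Set.empty
  let single_post_reaction : Bool :=
    raw_modes.contains "reaction_analysis" &&
      (raw_modes.contains "specific_news_answer" || has_explicit_scope)
  let triggered := if single_post_reaction then
      PySem.Set.discard (PySem.Set.add triggered "post_sentiment") "theme_sentiment"
    else triggered
  let triggered := if has_explicit_scope then PySem.Set.add triggered "topic_report" else triggered
  PySem.Set.contains triggered mode &&
    (PySem.Set.contains pvAlways mode || !(mode == primary_mode))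

lemma pvB_eq (raw_modes : List String) (primary_mode : String) (has_explicit_scope : Bool) :
    determine_secondary_modes_alt raw_modes primary_mode has_explicit_scope
      = pvOrder.filter (pvPredB raw_modes primary_mode has_explicit_scope) := rfl

-- A's whole body equals the two folds over its condition table (definitional)
lemma pvA_eq (raw_modes : List String) (primary_mode : String) (has_explicit_scope : Bool) :
    determine_secondary_modes raw_modes primary_mode has_explicit_scope
      = List.foldl (fun deduped mode => if deduped.contains mode then deduped else deduped ++ [mode]) []
          (List.foldl (fun acc (r : String × Bool) => if r.2 then acc ++ [r.1] else acc) []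
            (pvOrder.map (fun s => (s, pvCondA raw_modes primary_mode has_explicit_scope s)))) := rfl

-- the dedup pass is the identity on the filtered table because the rule names are distinct
lemma pvTable (rules : List (String × Bool)) (h : (rules.map (fun r => r.1)).Nodup) :
    List.foldl (fun deduped mode => if deduped.contains mode then deduped else deduped ++ [mode]) []
        (List.foldl (fun acc (r : String × Bool) => if r.2 then acc ++ [r.1] else acc) [] rules)
      = (rules.filter (fun r => r.2)).map (fun r => r.1) := by
  rw [PySem.List.foldl_append_if, List.nil_append]
  show PySem.Set.ofList _ = _
  have hs : (((rules.filter (fun r => r.2)).map (fun r => r.1)) : List String).Sublist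
      (rules.map (fun r => r.1)) := List.Sublist.map _ List.filter_sublist
  exact PySem.Set.ofList_eq_self_of_nodup _ (h.sublist hs)

lemma pvFilterOfMap (m : List String) (f : String → Bool) :
    (((m.map (fun s => (s, f s))).filter (fun r => r.2)).map (fun r => r.1)) = m.filter f := by
  induction m with
  | nil => rfl
  | cons x xs ih => by_cases h : f x <;> simp [h, ih]

lemma pvNodupNames (raw_modes : List String) (primary_mode : String) (has_explicit_scope : Bool) :
    ((pvOrder.map (fun s => (s, pvCondA raw_modes primary_mode has_explicit_scope s))).map (fun r => r.1)).Nodup := by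
  have h : (pvOrder.map (fun s => (s, pvCondA raw_modes primary_mode has_explicit_scope s))).map (fun r => r.1) = pvOrder := by
    simp [Function.comp_def]
  rw [h, pvOrder]; decide

lemma pvInterAny (L S : List String) :
    (!(PySem.Set.inter (PySem.Set.ofList L) S).isEmpty) = L.any (fun x => PySem.Set.contains S x) := by
  simp only [PySem.Set.inter, PySem.Set.contains]
  cases hA : L.any (fun x => List.contains S x) with
  | true =>
    simp only [List.any_eq_true] at hA
    obtain ⟨x, hxL, hx⟩ := hA
    simp only [Bool.not_eq_eq_eq_not, Bool.not_true, List.isEmpty_eq_false_iff_exists_mem,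
      List.mem_filter]
    exact ⟨x, (PySem.Set.mem_ofList L x).2 hxL, by simpa using hx⟩
  | false =>
    simp only [List.any_eq_false] at hA
    simp only [Bool.not_eq_eq_eq_not, Bool.not_false, List.isEmpty_iff, List.filter_eq_nil_iff]
    intro x hx
    simpa using hA x ((PySem.Set.mem_ofList L x).1 hx)

-- the first-match dict lookup read as an any, valid because the index's keys are distinct
lemma pvGetAny (t s : String) (l : List (String × String)) (h : (l.map Prod.fst).Nodup) :
    (PySem.Dict.get? ⟨l⟩ t).any (fun v => v == s) = l.any (fun kv => kv.1 == t && kv.2 == s) := by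
  induction l with
  | nil => simp [PySem.Dict.get?]
  | cons kv rest ih =>
    obtain ⟨k, v⟩ := kv
    rw [PySem.Dict.get?_mk_cons]
    simp only [List.map_cons, List.nodup_cons] at h
    by_cases hk : (k == t) = true
    · have ht : t ∉ rest.map Prod.fst := eq_of_beq hk ▸ h.1
      have hrest : rest.any (fun kv => kv.1 == t && kv.2 == s) = false := by
        simp only [List.any_eq_false]
        intro x hx
        cases hxe : x.1 == t
        · simp
        · exact absurd ((eq_of_beq hxe) ▸ List.mem_map_of_mem (f := Prod.fst) hx) ht
      simp [hk, hrest]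
    · rw [if_neg hk, ih h.2]
      simp [Bool.eq_false_iff.2 hk]

-- the inverted index, read back name by name: which keys map to each secondary
lemma pvLookup_source (t : String) :
    (PySem.Dict.get? pvTag2Sec t).any (fun v => v == "source_comparison") = (("source_comparison" == t) || ("low_subscribers_high_engagement_request" == t)) := by
  simp only [pvTag2Sec]
  rw [pvGetAny _ _ _ (by decide)]
  simp [Bool.or_assoc]

lemma pvLookup_pop (t : String) :
    (PySem.Dict.get? pvTag2Sec t).any (fun v => v == "post_popularity") = (("most_discussed_news" == t) || ("most_reacted_post" == t) || ("most_viewed_post" == t) || ("successful_posts_bucket" == t) || ("successful_post_request" == t) || ("successful_posts_request" == t) || ("specific_news_answer" == t)) := by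
  simp only [pvTag2Sec]
  rw [pvGetAny _ _ _ (by decide)]
  simp [Bool.or_assoc]

lemma pvLookup_under (t : String) :
    (PySem.Dict.get? pvTag2Sec t).any (fun v => v == "post_underperformance") = (("least_reacted_post" == t) || ("least_viewed_post" == t) || ("underperforming_posts_bucket" == t)) := by
  simp only [pvTag2Sec]
  rw [pvGetAny _ _ _ (by decide)]
  simp [Bool.or_assoc]

lemma pvLookup_psent (t : String) :
    (PySem.Dict.get? pvTag2Sec t).any (fun v => v == "post_sentiment") = (("most_negative_post" == t) || ("most_positive_post" == t)) := by
  simp only [pvTag2Sec]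
  rw [pvGetAny _ _ _ (by decide)]
  simp [Bool.or_assoc]

lemma pvLookup_tpop (t : String) :
    (PySem.Dict.get? pvTag2Sec t).any (fun v => v == "theme_popularity") = (("theme_popularity_ranked" == t)) := by
  simp only [pvTag2Sec]
  rw [pvGetAny _ _ _ (by decide)]
  simp [Bool.or_assoc]

lemma pvLookup_tunder (t : String) :
    (PySem.Dict.get? pvTag2Sec t).any (fun v => v == "theme_underperformance") = (("theme_underperformance_ranked" == t) || ("theme_low_interest_request" == t)) := by
  simp only [pvTag2Sec]
  rw [pvGetAny _ _ _ (by decide)]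
  simp [Bool.or_assoc]

lemma pvLookup_tsent (t : String) :
    (PySem.Dict.get? pvTag2Sec t).any (fun v => v == "theme_sentiment") = (("negative_analysis" == t) || ("positive_analysis" == t) || ("reaction_analysis" == t) || ("support_analysis" == t) || ("complaints_analysis" == t) || ("concerns_analysis" == t) || ("polarization_analysis" == t)) := by
  simp only [pvTag2Sec]
  rw [pvGetAny _ _ _ (by decide)]
  simp [Bool.or_assoc]

lemma pvLookup_tint (t : String) :
    (PySem.Dict.get? pvTag2Sec t).any (fun v => v == "theme_interest") = (("interest_analysis" == t)) := by
  simp only [pvTag2Sec]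
  rw [pvGetAny _ _ _ (by decide)]
  simp [Bool.or_assoc]

lemma pvLookup_topic (t : String) :
    (PySem.Dict.get? pvTag2Sec t).any (fun v => v == "topic_report") = (("theme_analysis" == t)) := by
  simp only [pvTag2Sec]
  rw [pvGetAny _ _ _ (by decide)]
  simp [Bool.or_assoc]

lemma pvLookup_causal (t : String) :
    (PySem.Dict.get? pvTag2Sec t).any (fun v => v == "causal_explanation") = (("causal_explanation" == t)) := by
  simp only [pvTag2Sec]
  rw [pvGetAny _ _ _ (by decide)]
  simp [Bool.or_assoc]

lemma pvLookup_comp (t : String) :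
    (PySem.Dict.get? pvTag2Sec t).any (fun v => v == "comparison") = (("comparison" == t)) := by
  simp only [pvTag2Sec]
  rw [pvGetAny _ _ _ (by decide)]
  simp [Bool.or_assoc]

lemma pvLookup_per (t : String) :
    (PySem.Dict.get? pvTag2Sec t).any (fun v => v == "periodic_report") = (("periodic_report" == t)) := by
  simp only [pvTag2Sec]
  rw [pvGetAny _ _ _ (by decide)]
  simp [Bool.or_assoc]

lemma pvLookup_take (t : String) :
    (PySem.Dict.get? pvTag2Sec t).any (fun v => v == "takeaways_analysis") = (("takeaways_analysis" == t)) := by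
  simp only [pvTag2Sec]
  rw [pvGetAny _ _ _ (by decide)]
  simp [Bool.or_assoc]

lemma pvSomeIffAny (t s : String) :
    (PySem.Dict.get? pvTag2Sec t = some s) ↔ (PySem.Dict.get? pvTag2Sec t).any (fun v => v == s) = true := by
  cases h : PySem.Dict.get? pvTag2Sec t <;> simp

lemma pvKeyMem_source (l : List String) :
    (∃ t ∈ l, PySem.Dict.get? pvTag2Sec t = some "source_comparison") ↔ ("source_comparison" ∈ l ∨ "low_subscribers_high_engagement_request" ∈ l) := by
  simp only [pvSomeIffAny, pvLookup_source, Bool.or_eq_true, beq_iff_eq]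
  simp [and_or_left, exists_or, or_assoc]

lemma pvKeyMem_pop (l : List String) :
    (∃ t ∈ l, PySem.Dict.get? pvTag2Sec t = some "post_popularity") ↔ ("most_discussed_news" ∈ l ∨ "most_reacted_post" ∈ l ∨ "most_viewed_post" ∈ l ∨ "successful_posts_bucket" ∈ l ∨ "successful_post_request" ∈ l ∨ "successful_posts_request" ∈ l ∨ "specific_news_answer" ∈ l) := by
  simp only [pvSomeIffAny, pvLookup_pop, Bool.or_eq_true, beq_iff_eq]
  simp [and_or_left, exists_or, or_assoc]

lemma pvKeyMem_under (l : List String) :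
    (∃ t ∈ l, PySem.Dict.get? pvTag2Sec t = some "post_underperformance") ↔ ("least_reacted_post" ∈ l ∨ "least_viewed_post" ∈ l ∨ "underperforming_posts_bucket" ∈ l) := by
  simp only [pvSomeIffAny, pvLookup_under, Bool.or_eq_true, beq_iff_eq]
  simp [and_or_left, exists_or, or_assoc]

lemma pvKeyMem_psent (l : List String) :
    (∃ t ∈ l, PySem.Dict.get? pvTag2Sec t = some "post_sentiment") ↔ ("most_negative_post" ∈ l ∨ "most_positive_post" ∈ l) := by
  simp only [pvSomeIffAny, pvLookup_psent, Bool.or_eq_true, beq_iff_eq]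
  simp [and_or_left, exists_or, or_assoc]

lemma pvKeyMem_tpop (l : List String) :
    (∃ t ∈ l, PySem.Dict.get? pvTag2Sec t = some "theme_popularity") ↔ ("theme_popularity_ranked" ∈ l) := by
  simp only [pvSomeIffAny, pvLookup_tpop, Bool.or_eq_true, beq_iff_eq]
  simp [and_or_left, exists_or, or_assoc]

lemma pvKeyMem_tunder (l : List String) :
    (∃ t ∈ l, PySem.Dict.get? pvTag2Sec t = some "theme_underperformance") ↔ ("theme_underperformance_ranked" ∈ l ∨ "theme_low_interest_request" ∈ l) := by
  simp only [pvSomeIffAny, pvLookup_tunder, Bool.or_eq_true, beq_iff_eq]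
  simp [and_or_left, exists_or, or_assoc]

lemma pvKeyMem_tsent (l : List String) :
    (∃ t ∈ l, PySem.Dict.get? pvTag2Sec t = some "theme_sentiment") ↔ ("negative_analysis" ∈ l ∨ "positive_analysis" ∈ l ∨ "reaction_analysis" ∈ l ∨ "support_analysis" ∈ l ∨ "complaints_analysis" ∈ l ∨ "concerns_analysis" ∈ l ∨ "polarization_analysis" ∈ l) := by
  simp only [pvSomeIffAny, pvLookup_tsent, Bool.or_eq_true, beq_iff_eq]
  simp [and_or_left, exists_or, or_assoc]

lemma pvKeyMem_tint (l : List String) :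
    (∃ t ∈ l, PySem.Dict.get? pvTag2Sec t = some "theme_interest") ↔ ("interest_analysis" ∈ l) := by
  simp only [pvSomeIffAny, pvLookup_tint, Bool.or_eq_true, beq_iff_eq]
  simp [and_or_left, exists_or, or_assoc]

lemma pvKeyMem_topic (l : List String) :
    (∃ t ∈ l, PySem.Dict.get? pvTag2Sec t = some "topic_report") ↔ ("theme_analysis" ∈ l) := by
  simp only [pvSomeIffAny, pvLookup_topic, Bool.or_eq_true, beq_iff_eq]
  simp [and_or_left, exists_or, or_assoc]

lemma pvKeyMem_causal (l : List String) :
    (∃ t ∈ l, PySem.Dict.get? pvTag2Sec t = some "causal_explanation") ↔ ("causal_explanation" ∈ l) := by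
  simp only [pvSomeIffAny, pvLookup_causal, Bool.or_eq_true, beq_iff_eq]
  simp [and_or_left, exists_or, or_assoc]

lemma pvKeyMem_comp (l : List String) :
    (∃ t ∈ l, PySem.Dict.get? pvTag2Sec t = some "comparison") ↔ ("comparison" ∈ l) := by
  simp only [pvSomeIffAny, pvLookup_comp, Bool.or_eq_true, beq_iff_eq]
  simp [and_or_left, exists_or, or_assoc]

lemma pvKeyMem_per (l : List String) :
    (∃ t ∈ l, PySem.Dict.get? pvTag2Sec t = some "periodic_report") ↔ ("periodic_report" ∈ l) := by
  simp only [pvSomeIffAny, pvLookup_per, Bool.or_eq_true, beq_iff_eq]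
  simp [and_or_left, exists_or, or_assoc]

lemma pvKeyMem_take (l : List String) :
    (∃ t ∈ l, PySem.Dict.get? pvTag2Sec t = some "takeaways_analysis") ↔ ("takeaways_analysis" ∈ l) := by
  simp only [pvSomeIffAny, pvLookup_take, Bool.or_eq_true, beq_iff_eq]
  simp [and_or_left, exists_or, or_assoc]

-- the triggered-set fold: membership = some input tag maps to the name
lemma pvTrigMem (l : List String) (acc : PySem.Set String) (s : String) :
    (s ∈ l.foldl (fun acc tag =>
        match PySem.Dict.get? pvTag2Sec tag with
        | some sec => PySem.Set.add acc sec
        | none => acc) acc)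
      ↔ (s ∈ acc ∨ ∃ t ∈ l, PySem.Dict.get? pvTag2Sec t = some s) := by
  induction l generalizing acc with
  | nil => simp
  | cons t ts ih =>
    simp only [List.foldl_cons, List.mem_cons, ih]
    cases h : PySem.Dict.get? pvTag2Sec t with
    | none =>
      constructor
      · rintro (hs | ⟨u, hu, hg⟩)
        · exact Or.inl hs
        · exact Or.inr ⟨u, Or.inr hu, hg⟩
      · rintro (hs | ⟨u, (rfl | hu), hg⟩)
        · exact Or.inl hs
        · rw [h] at hg; cases hg
        · exact Or.inr ⟨u, hu, hg⟩
    | some v =>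
      simp only [h, PySem.Set.mem_add]
      constructor
      · rintro ((hs | rfl) | ⟨u, hu, hg⟩)
        · exact Or.inl hs
        · exact Or.inr ⟨t, Or.inl rfl, h⟩
        · exact Or.inr ⟨u, Or.inr hu, hg⟩
      · rintro (hs | ⟨u, (rfl | hu), hg⟩)
        · exact Or.inl (Or.inl hs)
        · rw [h] at hg; injection hg with hvs; exact Or.inl (Or.inr hvs.symm)
        · exact Or.inr ⟨u, hu, hg⟩

-- pointwise agreement of the two condition readings on the 13 rule names
lemma pvPointwise (raw_modes : List String) (primary_mode : String) (has_explicit_scope : Bool) :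
    ∀ s ∈ pvOrder, pvPredB raw_modes primary_mode has_explicit_scope s
      = pvCondA raw_modes primary_mode has_explicit_scope s := by
  intro s hs
  simp only [pvOrder, List.mem_cons, List.not_mem_nil, or_false] at hs
  rcases hs with rfl | rfl | rfl | rfl | rfl | rfl | rfl | rfl | rfl | rfl | rfl | rfl | rfl <;>
  · rw [Bool.eq_iff_iff]
    simp only [pvPredB, pvCondA]
    by_cases h3 : has_explicit_scope <;>
    by_cases hra : ("reaction_analysis" : String) ∈ raw_modes <;>
    by_cases hsna : ("specific_news_answer" : String) ∈ raw_modes <;>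
    simp [h3, hra, hsna, pvTrigMem, PySem.Set.mem_add, PySem.Set.mem_discard,
      PySem.Set.mem_ofList, pvKeyMem_source, pvKeyMem_pop, pvKeyMem_under, pvKeyMem_psent, pvKeyMem_tpop, pvKeyMem_tunder, pvKeyMem_tsent, pvKeyMem_tint, pvKeyMem_topic, pvKeyMem_causal, pvKeyMem_comp, pvKeyMem_per, pvKeyMem_take, pvInterAny, pvAlways, ne_comm,
      and_comm, and_left_comm, and_assoc, or_comm, or_left_comm, or_assoc]

-- ===== VERDICT (by name: the statement is the Claim_ definition above) =====
set_option maxHeartbeats 1000000 in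
theorem determine_secondary_modes_spec : Claim_equal_determine_secondary_modes := by
  intro raw_modes primary_mode has_explicit_scope _
  unfold Spec_determine_secondary_modes
  rw [pvA_eq, pvB_eq,
    pvTable _ (pvNodupNames raw_modes primary_mode has_explicit_scope),
    pvFilterOfMap]
  exact (List.filter_congr (pvPointwise raw_modes primary_mode has_explicit_scope)).symm
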